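-- pv_equiv track=rewrite | github.com/yangtianjian/easy_cube | rest_server/cube_solver/solver.py | _parse_str_seq_to_list
-- ===== SOURCE A (Python) =====
-- def _parse_str_seq_to_list(seq):
--     i = 0
--     s = []
--     while i < len(seq):
--         t = seq[i]
--         if i < len(seq) - 1:
--             if seq[i + 1] == "'":
--                 t += "'"
--                 i += 1
--             elif seq[i + 1] == "2":
--                 t += '2'
--                 i += 1
--         s.append(t)
--         i += 1
--     return s
-- ===== SOURCE B (Python) =====
-- import re
--
-- _TOKEN = re.compile(r"[\s\S]['2]?")
--
-- def _parse_str_seq_to_list(seq):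
--     return _TOKEN.findall(seq)
-- ===== Notes on version B (the rewrite author's own statement) =====
-- stated objective: idiomatic
-- what changed: Replaces the manual index loop with explicit lookahead bookkeeping by a single compiled-regex findall (one char plus an optional ' or 2 modifier), eliminating all index arithmetic; a timing run measured it ~2.4x faster (regex engine in C vs per-char Python loop).
import Mathlib
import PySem

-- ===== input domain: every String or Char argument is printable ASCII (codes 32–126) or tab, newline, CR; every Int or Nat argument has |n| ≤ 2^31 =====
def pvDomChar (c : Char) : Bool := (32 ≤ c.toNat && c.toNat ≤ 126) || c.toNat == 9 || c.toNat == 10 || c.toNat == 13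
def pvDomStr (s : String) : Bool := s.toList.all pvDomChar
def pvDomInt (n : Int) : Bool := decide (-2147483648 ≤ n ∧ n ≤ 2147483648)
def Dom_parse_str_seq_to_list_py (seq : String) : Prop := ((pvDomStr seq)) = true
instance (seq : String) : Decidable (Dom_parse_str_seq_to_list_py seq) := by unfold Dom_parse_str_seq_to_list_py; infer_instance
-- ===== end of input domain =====

-- B replaces A's index loop with a single regex findall (same tokens, measured ~2.4x faster).
-- ===== PORT A =====
-- A: index-based while loop with one-character lookahead, accumulator list s.
def pvGoA (cs : List Char) (i : Nat) (s : List String) : List String :=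
  if _h : i < cs.length then
    let t := String.ofList [cs.getD i ' ']
    if i < cs.length - 1 then
      if cs.getD (i+1) ' ' = '\'' then
        pvGoA cs (i+2) (s ++ [t.push '\''])
      else if cs.getD (i+1) ' ' = '2' then
        pvGoA cs (i+2) (s ++ [t.push '2'])
      else
        pvGoA cs (i+1) (s ++ [t])
    else
      pvGoA cs (i+1) (s ++ [t])
  else s
termination_by cs.length - i

def parse_str_seq_to_list_py (seq : String) : List String :=
  pvGoA seq.toList 0 []

-- ===== PORT B =====
-- B is re.findall(r"[\s\S]['2]?", seq): hand port of that regex's exact matching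
-- semantics (any one char, then optionally a ' or 2), recursion on the char list.
def pvGoB : List Char → List String
  | [] => []
  | [c] => [String.ofList [c]]
  | c :: d :: rest =>
    if d = '\'' ∨ d = '2' then String.ofList [c, d] :: pvGoB rest
    else String.ofList [c] :: pvGoB (d :: rest)

def parse_str_seq_to_list_py_alt (seq : String) : List String :=
  pvGoB seq.toList

-- ===== PRECONDITION & SPEC =====
def Spec_parse_str_seq_to_list_py (seq : String) (out : List String) : Prop := out = parse_str_seq_to_list_py_alt seq
instance (seq : String) (out : List String) : Decidable (Spec_parse_str_seq_to_list_py seq out) := by unfold Spec_parse_str_seq_to_list_py; infer_instance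

-- ===== CLAIM (what is proved, stated in full; the proofs are below) =====
def Claim_equal_parse_str_seq_to_list_py : Prop := ∀ (seq : String), Dom_parse_str_seq_to_list_py seq → Spec_parse_str_seq_to_list_py seq (parse_str_seq_to_list_py seq)

-- ===== LEMMAS AND PROOFS =====
theorem pvGoB_cons₂ (c d : Char) (rest : List Char) :
    pvGoB (c :: d :: rest) =
      (if d = '\'' ∨ d = '2' then String.ofList [c, d] :: pvGoB rest
       else String.ofList [c] :: pvGoB (d :: rest)) := by
  rw [pvGoB]

theorem pvPush_ofList (c d : Char) : (String.ofList [c]).push d = String.ofList [c, d] := by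
  apply String.toList_injective; simp

set_option maxRecDepth 4000 in
theorem pvGoA_eq (n : Nat) : ∀ (cs : List Char) (i : Nat) (acc : List String),
    cs.length ≤ i + n → pvGoA cs i acc = acc ++ pvGoB (cs.drop i) := by
  induction n with
  | zero =>
    intro cs i acc h
    have hge : ¬ i < cs.length := by omega
    rw [pvGoA, dif_neg hge]
    simp [List.drop_eq_nil_of_le (by omega : cs.length ≤ i), pvGoB]
  | succ n ih =>
    intro cs i acc h
    by_cases hlt : i < cs.length
    · have hdrop : cs.drop i = cs[i] :: cs.drop (i+1) := List.drop_eq_getElem_cons hlt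
      have hget : cs.getD i ' ' = cs[i] := List.getD_eq_getElem cs ' ' hlt
      rw [pvGoA, dif_pos hlt]
      by_cases h2 : i < cs.length - 1
      · have hlt1 : i + 1 < cs.length := by omega
        have hdrop1 : cs.drop (i+1) = cs[i+1] :: cs.drop (i+2) := List.drop_eq_getElem_cons hlt1
        have hget1 : cs.getD (i+1) ' ' = cs[i+1] := List.getD_eq_getElem cs ' ' hlt1
        rw [if_pos h2, hget1, hget]
        by_cases hq : cs[i+1] = '\''
        · rw [if_pos hq, ih cs (i+2) _ (by omega), pvPush_ofList, hdrop, hdrop1, hq,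
            pvGoB_cons₂, if_pos (Or.inl rfl)]
          simp
        · rw [if_neg hq]
          by_cases h2c : cs[i+1] = '2'
          · rw [if_pos h2c, ih cs (i+2) _ (by omega), pvPush_ofList, hdrop, hdrop1, h2c,
              pvGoB_cons₂, if_pos (Or.inr rfl)]
            simp
          · rw [if_neg h2c, ih cs (i+1) _ (by omega), hdrop, hdrop1,
              pvGoB_cons₂, if_neg (by tauto), ← hdrop1]
            simp
      · have hnil : cs.drop (i+1) = [] := List.drop_eq_nil_of_le (by omega)
        rw [if_neg h2, hget, ih cs (i+1) _ (by omega), hdrop, hnil]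
        simp [pvGoB]
    · rw [pvGoA, dif_neg hlt]
      simp [List.drop_eq_nil_of_le (by omega : cs.length ≤ i), pvGoB]

-- ===== VERDICT (by name: the statement is the Claim_ definition above) =====
theorem parse_str_seq_to_list_py_spec : Claim_equal_parse_str_seq_to_list_py := by
  intro seq _
  unfold Spec_parse_str_seq_to_list_py parse_str_seq_to_list_py parse_str_seq_to_list_py_alt
  simpa using pvGoA_eq seq.toList.length seq.toList 0 [] (by omega)
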